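-- pv_equiv track=rewrite | github.com/YGears/ProjectgroepY4 | MarkAndré/ai/week_3/opgave_2.py | KbordersQ
-- ===== SOURCE A (Python) =====
-- neighbors = {0:[3], 1:[2], 2:[1,4,3], 3:[0,2,5], 4:[2,5], 5:[3,4,6,7], 6:[5], 7:[5]}
--
-- def KbordersQ(board):
--     kbq = True
--     for x in range(len(board)): # elke heer grenst een vrouw
--         if board[x] == 'K':
--             borderingCards = []
--
--             for y in neighbors[x]:
--                 borderingCards.append(board[y])
--             if 'Q' not in borderingCards: kbq = False
--
--     return kbq
-- ===== SOURCE B (Python) =====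
-- neighbors = {0:[3], 1:[2], 2:[1,4,3], 3:[0,2,5], 4:[2,5], 5:[3,4,6,7], 6:[5], 7:[5]}
--
-- def KbordersQ(board):
--     # invert the traversal: index every cell that borders a Queen, then check the Kings
--     queen_adjacent = set()
--     for q, card in enumerate(board):
--         if card == 'Q':
--             queen_adjacent.update(neighbors.get(q, []))
--     return all(card != 'K' or x in queen_adjacent for x, card in enumerate(board))
-- ===== Notes on version B (the rewrite author's own statement) =====
-- stated objective: alternative
-- what changed: Inverts the traversal: instead of scanning each King's neighbor list for a Queen, B first builds the set of cells adjacent to any Queen (one pass over Queens, using the symmetry of the neighbors relation) and then checks every King for membership in that set.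
import Mathlib
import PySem

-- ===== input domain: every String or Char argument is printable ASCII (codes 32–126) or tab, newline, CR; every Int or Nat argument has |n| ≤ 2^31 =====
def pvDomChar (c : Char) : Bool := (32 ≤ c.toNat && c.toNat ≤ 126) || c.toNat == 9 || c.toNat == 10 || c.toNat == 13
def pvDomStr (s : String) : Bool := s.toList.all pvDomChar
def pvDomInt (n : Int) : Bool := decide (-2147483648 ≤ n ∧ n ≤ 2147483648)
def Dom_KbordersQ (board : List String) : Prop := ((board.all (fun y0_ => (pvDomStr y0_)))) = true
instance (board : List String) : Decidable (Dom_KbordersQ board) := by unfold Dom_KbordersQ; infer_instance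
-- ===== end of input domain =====

-- B inverts the traversal: one pass over Queens builds the set of queen-bordering cells, a second pass checks the Kings against it (alternative decomposition, return value only).

-- the module constant `neighbors` (shared data of both versions)
def pyNeighbors : PySem.Dict Int (List Int) :=
  PySem.Dict.mk [(0,[3]), (1,[2]), (2,[1,4,3]), (3,[0,2,5]), (4,[2,5]), (5,[3,4,6,7]), (6,[5]), (7,[5])]

-- ===== PORT A =====
def KbordersQ (board : List String) : Bool :=
  (PySem.List.pyRange 0 (PySem.List.len board) 1).foldl
    (fun kbq x =>
      if PySem.List.pyGetD board x "" == "K" then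
        let borderingCards :=
          (pyNeighbors.getD x []).foldl (fun acc y => acc ++ [PySem.List.pyGetD board y ""]) []
        if !borderingCards.contains "Q" then false else kbq
      else kbq) true

-- ===== PORT B =====
def KbordersQ_alt (board : List String) : Bool :=
  let queenAdjacent : PySem.Set Int :=
    (PySem.List.enumerate board 0).foldl
      (fun s p => if p.2 == "Q" then PySem.Set.update s (pyNeighbors.getD p.1 []) else s)
      PySem.Set.empty
  (PySem.List.enumerate board 0).all
    (fun p => p.2 != "K" || PySem.Set.contains queenAdjacent p.1)

-- ===== PRECONDITION & SPEC =====
-- Pre_ excludes exactly the inputs where A raises: a 'K' at an index ≥ 8 (KeyError on neighbors[x])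
-- or a 'K' whose neighbor index is beyond the end of the board (IndexError on board[y]).
def Pre_KbordersQ (board : List String) : Prop :=
  ∀ i : Nat, i < board.length → board.getD i "" = "K" →
    (i : Int) < 8 ∧ ∀ y ∈ pyNeighbors.getD (i : Int) [], y < (board.length : Int)
instance (board : List String) : Decidable (Pre_KbordersQ board) := by unfold Pre_KbordersQ; infer_instance

def pvWitness_KbordersQ : List String := ["K", "x", "x", "Q"]

def Spec_KbordersQ (board : List String) (out : Bool) : Prop := out = KbordersQ_alt board
instance (board : List String) (out : Bool) : Decidable (Spec_KbordersQ board out) := by unfold Spec_KbordersQ; infer_instance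

-- ===== CLAIM (what is proved, stated in full; the proofs are below) =====
def Claim_equal_KbordersQ : Prop := ∀ (board : List String), Dom_KbordersQ board → Pre_KbordersQ board → Spec_KbordersQ board (KbordersQ board)

-- ===== LEMMAS AND PROOFS =====

-- closed-form characterisation of the neighbors lookup
lemma nbrs_char (x : Int) : pyNeighbors.getD x [] =
    if x = 0 then [3] else if x = 1 then [2] else if x = 2 then [1,4,3] else
    if x = 3 then [0,2,5] else if x = 4 then [2,5] else if x = 5 then [3,4,6,7] else
    if x = 6 then [5] else if x = 7 then [5] else [] := by
  split_ifs <;> first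
    | (subst_vars; decide)
    | (simp only [pyNeighbors, PySem.Dict.getD, PySem.Dict.get?_mk_cons, beq_iff_eq]
       split_ifs <;> simp_all [PySem.Dict.get?])

lemma nbrs_range {x y : Int} (h : y ∈ pyNeighbors.getD x []) : 0 ≤ y ∧ y < 8 := by
  rw [nbrs_char] at h
  split_ifs at h <;> fin_cases h <;> decide

lemma nbrs_symm {x y : Int} (h : y ∈ pyNeighbors.getD x []) : x ∈ pyNeighbors.getD y [] := by
  rw [nbrs_char] at h
  split_ifs at h <;> subst_vars <;> fin_cases h <;> (rw [nbrs_char]; decide)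

lemma mem_foldl_update_if {α β : Type} [BEq α] [LawfulBEq α]
    (p : β → Bool) (g : β → List α) (l : List β) (s : PySem.Set α) (y : α) :
    y ∈ l.foldl (fun s b => if p b then PySem.Set.update s (g b) else s) s ↔
      y ∈ s ∨ ∃ b ∈ l, p b ∧ y ∈ g b := by
  induction l generalizing s with
  | nil => simp
  | cons b t ih =>
    by_cases h : p b = true <;> simp [h, ih, PySem.Set.mem_update] <;> tauto

lemma pyGetD_nat (board : List String) (j : Nat) :
    PySem.List.pyGetD board (j : Int) "" = board.getD j "" := by
  simp [PySem.List.pyGetD_natCast, List.getD]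

-- A's value: every King index has a Queen among its neighbor indices
lemma A_true_iff (board : List String) : KbordersQ board = true ↔
    ∀ j : Nat, j < board.length → board.getD j "" = "K" →
      ∃ y ∈ pyNeighbors.getD (j : Int) [], PySem.List.pyGetD board y "" = "Q" := by
  unfold KbordersQ
  rw [PySem.List.foldl_congr_mem (g := fun kbq x =>
    if (PySem.List.pyGetD board x "" == "K" &&
        !((pyNeighbors.getD x []).map (fun y => PySem.List.pyGetD board y "")).contains "Q")
    then false else kbq)]
  · rw [PySem.List.foldl_if_false_eq]
    simp only [Bool.true_and, Bool.not_eq_eq_eq_not, Bool.not_true, List.any_eq_false,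
      PySem.List.mem_pyRange_one]
    constructor
    · intro h j hj hK
      have h' := h (j : Int) ⟨Int.natCast_nonneg j, by
        simpa [PySem.List.len_eq] using (by exact_mod_cast hj : (j:Int) < (board.length : Int))⟩
      rw [pyGetD_nat, hK] at h'
      simpa [List.contains_eq_mem] using h'
    · intro h x hx
      obtain ⟨hx0, hxlen⟩ := hx
      obtain ⟨j, rfl⟩ := Int.eq_ofNat_of_zero_le hx0
      have hj : j < board.length := by
        have : (j : Int) < (board.length : Int) := by simpa [PySem.List.len_eq] using hxlen
        exact_mod_cast this
      intro hc
      rw [Bool.and_eq_true, beq_iff_eq, pyGetD_nat] at hc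
      obtain ⟨hK, hnc⟩ := hc
      obtain ⟨y, hy, hQ⟩ := h j hj hK
      exact absurd (List.mem_map.mpr ⟨y, hy, hQ⟩) (by simpa [List.contains_eq_mem] using hnc)
  · intro acc x _
    simp only [PySem.List.foldl_append_singleton_eq_map, List.nil_append]
    by_cases h : PySem.List.pyGetD board x "" == "K" <;> simp [h]

lemma qa_mem (board : List String) (y : Int) :
    y ∈ (PySem.List.enumerate board 0).foldl
      (fun s p => if p.2 == "Q" then PySem.Set.update s (pyNeighbors.getD p.1 []) else s)
      PySem.Set.empty ↔
    ∃ b ∈ PySem.List.enumerate board 0, b.2 = "Q" ∧ y ∈ pyNeighbors.getD b.1 [] := by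
  rw [mem_foldl_update_if]
  simp [PySem.Set.empty]

-- B's value: every King index is in the queen-adjacent set
lemma B_true_iff (board : List String) : KbordersQ_alt board = true ↔
    ∀ j : Nat, j < board.length → board.getD j "" = "K" →
      ∃ q : Nat, q < board.length ∧ board.getD q "" = "Q" ∧ (j : Int) ∈ pyNeighbors.getD (q : Int) [] := by
  unfold KbordersQ_alt
  constructor
  · intro h j hj hK
    have hp : ((j : Int), board[j]) ∈ PySem.List.enumerate board 0 := by
      rw [PySem.List.mem_enumerate_iff]; exact ⟨j, hj, by simp⟩
    have h' := List.all_eq_true.mp h _ hp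
    simp only [Bool.or_eq_true, bne_iff_ne, ne_eq, PySem.Set.contains_iff, qa_mem] at h'
    have hgj : board[j] = "K" := by
      rwa [List.getD_eq_getElem?_getD, List.getElem?_eq_getElem hj] at hK
    rcases h' with h' | ⟨b, hb, hQ, hmem⟩
    · exact absurd hgj (by simpa using h')
    · rw [PySem.List.mem_enumerate_iff] at hb
      obtain ⟨q, hq, rfl⟩ := hb
      simp only [Int.zero_add] at hQ hmem
      exact ⟨q, hq, by rw [List.getD_eq_getElem?_getD, List.getElem?_eq_getElem hq]; simpa using hQ, hmem⟩
  · intro h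
    rw [List.all_eq_true]
    intro p hp
    rw [PySem.List.mem_enumerate_iff] at hp
    obtain ⟨j, hj, rfl⟩ := hp
    simp only [Bool.or_eq_true, bne_iff_ne, ne_eq, PySem.Set.contains_iff, qa_mem, Int.zero_add]
    by_cases hK : board[j] = "K"
    · right
      obtain ⟨q, hq, hQ, hmem⟩ := h j hj
        (by rw [List.getD_eq_getElem?_getD, List.getElem?_eq_getElem hj]; simpa using hK)
      refine ⟨((q : Int), board[q]), ?_, ?_, by simpa using hmem⟩
      · rw [PySem.List.mem_enumerate_iff]; exact ⟨q, hq, by simp⟩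
      · simpa using (by rwa [List.getD_eq_getElem?_getD, List.getElem?_eq_getElem hq] at hQ : board[q] = "Q")
    · left; simpa using hK

theorem KbordersQ_spec : Claim_equal_KbordersQ := by
  intro board _ hpre
  unfold Spec_KbordersQ
  rw [Bool.eq_iff_iff, A_true_iff, B_true_iff]
  constructor
  · intro hA j hj hK
    obtain ⟨y, hy, hQ⟩ := hA j hj hK
    obtain ⟨hy0, _⟩ := nbrs_range hy
    have hylen : y < (board.length : Int) := (hpre j hj hK).2 y hy
    obtain ⟨m, rfl⟩ := Int.eq_ofNat_of_zero_le hy0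
    have hm : m < board.length := by exact_mod_cast hylen
    exact ⟨m, hm, by rwa [pyGetD_nat] at hQ, nbrs_symm hy⟩
  · intro hB j hj hK
    obtain ⟨q, hq, hQ, hmem⟩ := hB j hj hK
    exact ⟨(q : Int), nbrs_symm hmem, by rwa [pyGetD_nat]⟩
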